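-- pv_equiv track=rewrite | github.com/StepDan23/MADE_algorithms | hw_6/c.py | make_routes
-- ===== SOURCE A (Python) =====
-- def argmax_count(arr, cur_ind, count_arr):
--     max_ind = cur_ind
--     cur_val = arr[cur_ind]
--     max_count, i = 0, 0
--     while i < cur_ind:
--         if arr[i] < cur_val and count_arr[i] > max_count:
--             max_count = count_arr[i]
--             max_ind = i
--         i += 1
--     return max_ind
--
-- def make_routes(arr):
--     routes = [0 for _ in range(len(arr))]
--     count_arr = [0 for _ in range(len(arr))]
--     i = 0
--     while i < len(arr):
--         ind = argmax_count(arr, i, count_arr)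
--         routes[i] = ind
--         count_arr[i] = count_arr[ind] + 1
--         i += 1
--     return routes, count_arr
-- ===== SOURCE B (Python) =====
-- def make_routes(arr):
--     # Different structure: group processed indices into buckets by LIS-length
--     # (count) and search buckets top-down for the leftmost valid predecessor,
--     # instead of rescanning the whole prefix for every element.
--     routes, counts = [], []
--     buckets = []  # buckets[c-1]: [(value, index)] with count c, in index order
--     for i, v in enumerate(arr):
--         route, cnt = i, 1
--         for c in range(len(buckets), 0, -1):
--             pred = next((j for (w, j) in buckets[c - 1] if w < v), None)
--             if pred is not None:
--                 route, cnt = pred, c + 1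
--                 break
--         routes.append(route)
--         counts.append(cnt)
--         if cnt > len(buckets):
--             buckets.append([])
--         buckets[cnt - 1].append((v, i))
--     return routes, counts
-- ===== Notes on version B (the rewrite author's own statement) =====
-- stated objective: faster
-- what changed: B replaces A's per-element full rescan of the prefix (running argmax over all earlier indices) by buckets grouping processed indices by chain length, searched top-down with early exit at the first level containing a smaller value, so most elements stop after inspecting few entries.
import Mathlib
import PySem

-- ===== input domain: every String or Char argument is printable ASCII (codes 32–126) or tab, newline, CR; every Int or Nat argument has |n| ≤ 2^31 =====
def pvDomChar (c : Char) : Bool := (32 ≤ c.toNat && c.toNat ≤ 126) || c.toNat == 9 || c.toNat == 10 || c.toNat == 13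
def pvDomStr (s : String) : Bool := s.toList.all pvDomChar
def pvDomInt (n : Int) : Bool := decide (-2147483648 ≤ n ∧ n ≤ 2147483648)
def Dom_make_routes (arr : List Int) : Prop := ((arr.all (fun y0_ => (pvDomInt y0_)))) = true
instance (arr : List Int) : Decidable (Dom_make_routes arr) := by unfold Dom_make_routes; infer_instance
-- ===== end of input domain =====

-- B replaces A's full prefix rescan by buckets of processed indices grouped by
-- chain length, searched top-down for the leftmost valid predecessor; the
-- early exit made B measurably faster on a timing run's inputs.


-- ===== PORT A =====
-- the while loop of argmax_count; indices are always in range, so List.getD is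
-- exact for Python's arr[i] / count_arr[i] here
def argmaxLoop (arr : List Int) (cur_val : Int) (count_arr : List Int)
    (cur_ind i : Nat) (max_count : Int) (max_ind : Nat) : Nat :=
  if _h : i < cur_ind then
    if arr.getD i 0 < cur_val ∧ count_arr.getD i 0 > max_count then
      argmaxLoop arr cur_val count_arr cur_ind (i + 1) (count_arr.getD i 0) i
    else
      argmaxLoop arr cur_val count_arr cur_ind (i + 1) max_count max_ind
  else max_ind
termination_by cur_ind - i

def argmax_count (arr : List Int) (cur_ind : Nat) (count_arr : List Int) : Nat :=
  argmaxLoop arr (arr.getD cur_ind 0) count_arr cur_ind 0 0 cur_ind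

-- the while loop of make_routes; routes[i] = … / count_arr[i] = … become List.set
def mrLoop (arr : List Int) (i : Nat) (routes count_arr : List Int) : List Int × List Int :=
  if _h : i < arr.length then
    let ind := argmax_count arr i count_arr
    mrLoop arr (i + 1) (routes.set i (ind : Int))
      (count_arr.set i (count_arr.getD ind 0 + 1))
  else (routes, count_arr)
termination_by arr.length - i

def make_routes (arr : List Int) : List Int × List Int :=
  mrLoop arr 0 (List.replicate arr.length 0) (List.replicate arr.length 0)

-- ===== PORT B =====
-- levels are given top-down (the Python loop 'for c in range(len(buckets),0,-1)');
-- the returned level number is rest.length + 1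
def findPred (levels : List (List (Int × Nat))) (v : Int) : Option (Nat × Nat) :=
  match levels with
  | [] => none
  | b :: rest =>
    match b.find? (fun p => decide (p.1 < v)) with
    | some p => some (p.2, rest.length + 1)
    | none => findPred rest v

def addEntry (buckets : List (List (Int × Nat))) (cnt : Nat) (e : Int × Nat) :
    List (List (Int × Nat)) :=
  let bs := if buckets.length < cnt then buckets ++ [[]] else buckets
  bs.modify (cnt - 1) (fun b => b ++ [e])

def altLoop (rest : List Int) (i : Nat) (routesRev countsRev : List Int)
    (buckets : List (List (Int × Nat))) : List Int × List Int :=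
  match rest with
  | [] => (routesRev.reverse, countsRev.reverse)
  | v :: tl =>
    let rc : Nat × Nat :=
      match findPred buckets.reverse v with
      | none => (i, 1)
      | some (j, c) => (j, c + 1)
    altLoop tl (i + 1) (((rc.1 : Int)) :: routesRev) (((rc.2 : Int)) :: countsRev)
      (addEntry buckets rc.2 (v, i))

def make_routes_alt (arr : List Int) : List Int × List Int :=
  altLoop arr 0 [] [] []

-- ===== PRECONDITION & SPEC =====
def Spec_make_routes (arr : List Int) (out : List Int × List Int) : Prop := out = make_routes_alt arr
instance (arr : List Int) (out : List Int × List Int) : Decidable (Spec_make_routes arr out) := by unfold Spec_make_routes; infer_instance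

-- ===== CLAIM (what is proved, stated in full; the proofs are below) =====
def Claim_equal_make_routes : Prop := ∀ (arr : List Int), Dom_make_routes arr → Spec_make_routes arr (make_routes arr)

-- ===== LEMMAS AND PROOFS =====

-- an entry of the processed prefix: (value, index, chain count)
abbrev PvEntry := Int × Nat × Int

-- A's inner scan as a fold over explicit entries, carrying (max_count, max_ind)
def scanS (es : List PvEntry) (v : Int) (s : Int × Nat) : Int × Nat :=
  match es with
  | [] => s
  | e :: tl => if e.1 < v ∧ e.2.2 > s.1 then scanS tl v (e.2.2, e.2.1) else scanS tl v s

def mkEntries : List Int → List Int → Nat → List PvEntry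
  | v :: vs, c :: cs, s => (v, s, c) :: mkEntries vs cs (s + 1)
  | _, _, _ => []

def levelOf (es : List PvEntry) (c : Nat) : List (Int × Nat) :=
  (es.filter (fun e => e.2.2 == (c : Int))).map (fun e => (e.1, e.2.1))

def bucketsOf (es : List PvEntry) (M : Nat) : List (List (Int × Nat)) :=
  (List.range M).map (fun k => levelOf es (k + 1))

lemma scanS_append (a b : List PvEntry) (v : Int) (s : Int × Nat) :
    scanS (a ++ b) v s = scanS b v (scanS a v s) := by
  induction a generalizing s with
  | nil => rfl
  | cons e tl ih =>
    simp only [List.cons_append, scanS]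
    split_ifs <;> exact ih _

lemma scanS_no_update (es : List PvEntry) (v : Int) (s : Int × Nat)
    (h : ∀ e ∈ es, e.2.2 ≤ s.1) : scanS es v s = s := by
  induction es with
  | nil => rfl
  | cons e tl ih =>
    have hc : e.2.2 ≤ s.1 := (h e (List.mem_cons_self ..))
    simp only [scanS]
    rw [if_neg (fun hcon => absurd hcon.2 (by omega))]
    exact ih (fun e he => h e (List.mem_cons_of_mem _ he))

lemma scanS_fst_lt (es : List PvEntry) (v : Int) (s : Int × Nat) (K : Int)
    (h : ∀ e ∈ es, e.2.2 < K) (hs : s.1 < K) : (scanS es v s).1 < K := by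
  induction es generalizing s with
  | nil => exact hs
  | cons e tl ih =>
    simp only [scanS]
    split_ifs with hcond
    · exact ih _ (fun x hx => h x (List.mem_cons_of_mem _ hx)) (h e (List.mem_cons_self ..))
    · exact ih _ (fun x hx => h x (List.mem_cons_of_mem _ hx)) hs

lemma scanS_filter (es : List PvEntry) (v : Int) (s : Int × Nat) :
    scanS es v s = scanS (es.filter (fun e => decide (e.1 < v))) v s := by
  induction es generalizing s with
  | nil => rfl
  | cons e tl ih =>
    by_cases hw : e.1 < v
    · rw [List.filter_cons_of_pos (by simpa using hw)]
      rw [scanS, scanS]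
      split_ifs <;> exact ih _
    · rw [List.filter_cons_of_neg (by simpa using hw)]
      rw [scanS]
      rw [if_neg (by tauto)]
      exact ih _

lemma findPred_le (levels : List (List (Int × Nat))) (v : Int) (j c : Nat)
    (h : findPred levels v = some (j, c)) : c ≤ levels.length := by
  induction levels with
  | nil => simp [findPred] at h
  | cons b rest ih =>
    simp only [findPred] at h
    cases hf : b.find? (fun p => decide (p.1 < v)) with
    | some p =>
      rw [hf] at h
      simp only [Option.some.injEq, Prod.mk.injEq] at h
      simp only [List.length_cons]; omega
    | none =>
      rw [hf] at h
      have := ih h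
      simp only [List.length_cons]; omega

lemma bucketsOf_succ (es : List PvEntry) (M : Nat) :
    bucketsOf es (M + 1) = bucketsOf es M ++ [levelOf es (M + 1)] := by
  simp [bucketsOf, List.range_succ]

lemma length_bucketsOf (es : List PvEntry) (M : Nat) : (bucketsOf es M).length = M := by
  simp [bucketsOf]

-- main search lemma: A's scan over the entries = B's top-down bucket search
lemma scan_eq_search (M : Nat) (es : List PvEntry) (v : Int) (d : Nat)
    (hb : ∀ e ∈ es, 1 ≤ e.2.2 ∧ e.2.2 ≤ (M : Int)) :
    (findPred (bucketsOf es M).reverse v = none → (scanS es v (0, d)).2 = d)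
    ∧ (∀ j c, findPred (bucketsOf es M).reverse v = some (j, c) →
        (scanS es v (0, d)).2 = j ∧ ∃ w, (w, j, (c : Int)) ∈ es) := by
  induction M generalizing es with
  | zero =>
    have hes : es = [] := by
      cases es with
      | nil => rfl
      | cons e tl => exact absurd (hb e (by simp)) (by push_cast; omega)
    subst hes
    constructor
    · intro _; rfl
    · intro j c h; simp [bucketsOf, findPred] at h
  | succ M ih =>
    rw [bucketsOf_succ, List.reverse_append, List.reverse_singleton, List.singleton_append]
    simp only [findPred]
    cases hf : (levelOf es (M + 1)).find? (fun p => decide (p.1 < v)) with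
    | some p =>
      -- hit in the top bucket
      simp only [levelOf] at hf
      rw [List.find?_map] at hf
      obtain ⟨e0, he0, hpe⟩ := Option.map_eq_some_iff.mp hf
      rw [List.find?_filter] at he0
      rw [List.find?_eq_some_iff_append] at he0
      obtain ⟨hpred, as, bs, hdec, has⟩ := he0
      have hc0 : e0.2.2 = ((M + 1 : Nat) : Int) := by
        simp at hpred; exact_mod_cast hpred.1
      have hw0 : e0.1 < v := by simp at hpred; exact hpred.2
      have hscan : (scanS es v (0, d)).2 = e0.2.1 := by
        rw [scanS_filter, hdec, List.filter_append, List.filter_cons_of_pos (by simpa using hw0)]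
        rw [scanS_append, scanS]
        have hs1 : (scanS (as.filter (fun e => decide (e.1 < v))) v (0, d)).1
            < ((M + 1 : Nat) : Int) := by
          apply scanS_fst_lt
          · intro e he
            have hmem := List.mem_of_mem_filter he
            have hval : e.1 < v := by
              have := List.of_mem_filter he; simpa using this
            have hle : e.2.2 ≤ ((M + 1 : Nat) : Int) :=
              (hb e (by rw [hdec]; exact List.mem_append_left _ hmem)).2
            have hne := has e hmem
            simp at hne
            rcases hne with h | h
            · omega
            · omega
          · push_cast; omega
        rw [if_pos ⟨hw0, by omega⟩]
        rw [scanS_no_update]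
        intro e he
        have hmem := List.mem_of_mem_filter he
        have hle : e.2.2 ≤ ((M + 1 : Nat) : Int) := by
          refine (hb e ?_).2
          rw [hdec]
          exact List.mem_append_right _ (List.mem_cons_of_mem _ hmem)
        rw [hc0]; exact hle
      constructor
      · intro h; simp at h
      · intro j c h
        simp only [Option.some.injEq, Prod.mk.injEq, List.length_reverse] at h
        obtain ⟨hj, hcv⟩ := h
        have hlenM : (bucketsOf es M).length = M := by simp [bucketsOf]
        have hclen : c = M + 1 := by rw [hlenM] at hcv; omega
        constructor
        · rw [hscan, ← hj, ← hpe]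
        · refine ⟨e0.1, ?_⟩
          have h2 : j = e0.2.1 := by rw [← hj, ← hpe]
          have h3 : (c : Int) = e0.2.2 := by rw [hc0, hclen]
          have he0eq : (e0.1, j, (c : Int)) = e0 := by rw [h2, h3]
          rw [he0eq, hdec]
          exact List.mem_append_right _ (List.mem_cons_self ..)
    | none =>
      -- no valid entry in the top bucket: restrict to counts ≤ M
      have hnov : ∀ q ∈ levelOf es (M + 1), ¬ (q.1 < v) := by
        intro q hq
        have := List.find?_eq_none.mp hf q hq
        simpa using this
      set es' := es.filter (fun e => decide (e.2.2 ≤ (M : Int))) with hes'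
      have key1 : scanS es v (0, d) = scanS es' v (0, d) := by
        rw [scanS_filter, scanS_filter es', hes', List.filter_filter]
        congr 1
        apply List.filter_congr
        intro e he
        by_cases hle : e.2.2 ≤ (M : Int)
        · simp [hle]
        · have hval : ¬ (e.1 < v) := by
            apply hnov (e.1, e.2.1)
            simp only [levelOf]
            refine List.mem_map.mpr ⟨e, ?_, rfl⟩
            refine List.mem_filter.mpr ⟨he, ?_⟩
            have := (hb e he).2
            simp only [beq_iff_eq]
            push_cast; omega
          simp [hval]
      have key2 : bucketsOf es' M = bucketsOf es M := by
        apply List.ext_getElem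
        · simp [bucketsOf]
        · intro k hk1 hk2
          simp only [bucketsOf, List.getElem_map, List.getElem_range]
          have hkM : k < M := by simpa [bucketsOf] using hk1
          simp only [levelOf, hes', List.filter_filter]
          congr 1
          apply List.filter_congr
          intro e he
          by_cases hq : e.2.2 = ((k + 1 : Nat) : Int)
          · simp [hq]
            omega
          · push_cast at hq
            simp [hq]
      have key3 : ∀ e ∈ es', 1 ≤ e.2.2 ∧ e.2.2 ≤ (M : Int) := by
        intro e he
        have h1 := List.mem_of_mem_filter he
        have h2 := List.of_mem_filter he
        exact ⟨(hb e h1).1, by simpa using h2⟩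
      obtain ⟨ihn, ihs⟩ := ih es' key3
      constructor
      · intro h
        rw [key1]
        rw [key2] at ihn
        exact ihn h
      · intro j c h
        rw [key2] at ihs
        obtain ⟨hs, w, hw⟩ := ihs j c h
        exact ⟨by rw [key1]; exact hs, w, List.mem_of_mem_filter hw⟩

lemma mkEntries_mem (vals cnts : List Int) (s : Nat) (w : Int) (j : Nat) (c : Int)
    (h : (w, j, c) ∈ mkEntries vals cnts s) :
    s ≤ j ∧ j - s < cnts.length ∧ cnts.getD (j - s) 0 = c := by
  induction vals generalizing cnts s with
  | nil => simp [mkEntries] at h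
  | cons x vs ih =>
    cases cnts with
    | nil => simp [mkEntries] at h
    | cons y cs =>
      simp only [mkEntries, List.mem_cons] at h
      rcases h with h | h
      · simp only [Prod.mk.injEq] at h
        obtain ⟨rfl, rfl, rfl⟩ := h
        simp
      · obtain ⟨h1, h2, h3⟩ := ih cs (s + 1) h
        refine ⟨by omega, by simp; omega, ?_⟩
        have : j - s = (j - (s + 1)) + 1 := by omega
        rw [this]
        simpa using h3

lemma mkEntries_count_mem (vals cnts : List Int) (s : Nat) (e : PvEntry)
    (h : e ∈ mkEntries vals cnts s) : e.2.2 ∈ cnts := by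
  induction vals generalizing cnts s with
  | nil => simp [mkEntries] at h
  | cons x vs ih =>
    cases cnts with
    | nil => simp [mkEntries] at h
    | cons y cs =>
      simp only [mkEntries, List.mem_cons] at h
      rcases h with h | h
      · subst h; simp
      · exact List.mem_cons_of_mem _ (ih cs (s + 1) h)

lemma mkEntries_append (vals cnts : List Int) (s : Nat) (x y : Int)
    (h : vals.length = cnts.length) :
    mkEntries (vals ++ [x]) (cnts ++ [y]) s
      = mkEntries vals cnts s ++ [(x, s + vals.length, y)] := by
  induction vals generalizing cnts s with
  | nil =>
    cases cnts with
    | nil => simp [mkEntries]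
    | cons _ _ => simp at h
  | cons a vs ih =>
    cases cnts with
    | nil => simp at h
    | cons b cs =>
      simp only [List.cons_append, mkEntries, List.length_cons]
      rw [ih cs (s + 1) (by simpa using h)]
      simp; omega

lemma levelOf_append (es : List PvEntry) (e : PvEntry) (c : Nat) :
    levelOf (es ++ [e]) c
      = levelOf es c ++ (if e.2.2 == (c : Int) then [(e.1, e.2.1)] else []) := by
  simp only [levelOf, List.filter_append, List.map_append, List.filter_cons, List.filter_nil]
  split_ifs <;> simp

lemma getElem_bucketsOf (es : List PvEntry) (M k : Nat) (h : k < (bucketsOf es M).length) :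
    (bucketsOf es M)[k] = levelOf es (k + 1) := by
  simp [bucketsOf]

lemma addEntry_eq (es : List PvEntry) (M cnt : Nat) (v : Int) (i : Nat)
    (h1 : 1 ≤ cnt) (h2 : cnt ≤ M + 1)
    (hM : ∀ e ∈ es, e.2.2 ≤ (M : Int)) :
    addEntry (bucketsOf es M) cnt (v, i)
      = bucketsOf (es ++ [(v, i, (cnt : Int))]) (max M cnt) := by
  have hlen : (bucketsOf es M).length = M := by simp [bucketsOf]
  unfold addEntry
  rw [hlen]
  show ((if M < cnt then bucketsOf es M ++ [[]] else bucketsOf es M).modify (cnt - 1)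
      (fun b => b ++ [(v, i)])) = bucketsOf (es ++ [(v, i, (cnt : Int))]) (max M cnt)
  by_cases hc : M < cnt
  · -- cnt = M + 1 : extend with a fresh bucket
    have hcM : cnt = M + 1 := by omega
    subst hcM
    rw [if_pos hc, Nat.max_eq_right (by omega)]
    apply List.ext_getElem
    · simp [bucketsOf]
    · intro k hk1 hk2
      have hkM1 : k < M + 1 := by
        simpa [List.length_modify, hlen] using hk1
      rw [List.getElem_modify]
      rw [getElem_bucketsOf, levelOf_append]
      by_cases hkM : k < M
      · rw [if_neg (by omega)]
        rw [List.getElem_append_left (by rw [hlen]; exact hkM)]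
        rw [getElem_bucketsOf]
        rw [if_neg (by simp; omega)]
        simp
      · have hke : k = M := by omega
        have hnil : levelOf es (M + 1) = [] := by
          simp only [levelOf, List.map_eq_nil_iff, List.filter_eq_nil_iff]
          intro e he
          have := hM e he
          simp; omega
        rw [if_pos (by omega)]
        rw [List.getElem_append_right (by rw [hlen]; omega)]
        simp only [hke]
        rw [hnil, if_pos (by simp)]
        simp [hlen]
  · -- cnt ≤ M : append into an existing bucket
    rw [if_neg hc, Nat.max_eq_left (by omega)]
    apply List.ext_getElem
    · simp [bucketsOf]
    · intro k hk1 hk2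
      have hkM : k < M := by simpa [List.length_modify, hlen] using hk1
      rw [List.getElem_modify]
      rw [getElem_bucketsOf, getElem_bucketsOf, levelOf_append]
      by_cases hkc : cnt - 1 = k
      · rw [if_pos hkc, if_pos (by simp; omega)]
      · rw [if_neg hkc, if_neg (by simp; omega)]
        simp

-- A's inner while loop equals the scan over the explicit entries of the prefix
lemma take_drop_cons (l : List Int) (ci j : Nat) (hj : j < ci) (hci : ci ≤ l.length) :
    (l.take ci).drop j = l.getD j 0 :: (l.take ci).drop (j + 1) := by
  have hjl : j < (l.take ci).length := by simp [List.length_take]; omega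
  rw [List.drop_eq_getElem_cons hjl]
  congr 1
  rw [List.getElem_take]
  exact (List.getD_eq_getElem l 0 (by simp at hjl; omega)).symm

lemma argmaxLoop_eq_scan (arr count_arr : List Int) (ci : Nat) (v : Int)
    (j : Nat) (mc : Int) (mi : Nat)
    (hj : j ≤ ci) (h1 : ci ≤ arr.length) (h2 : ci ≤ count_arr.length) :
    argmaxLoop arr v count_arr ci j mc mi
      = (scanS (mkEntries ((arr.take ci).drop j) ((count_arr.take ci).drop j) j) v (mc, mi)).2 := by
  suffices H : ∀ n j mc mi, j ≤ ci → ci - j = n →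
      argmaxLoop arr v count_arr ci j mc mi
        = (scanS (mkEntries ((arr.take ci).drop j) ((count_arr.take ci).drop j) j) v (mc, mi)).2 by
    exact H (ci - j) j mc mi hj rfl
  intro n
  induction n with
  | zero =>
    intro j mc mi hj hn
    have hje : j = ci := by omega
    subst hje
    rw [argmaxLoop]
    rw [dif_neg (by omega)]
    rw [List.drop_of_length_le (by simp)]
    simp [mkEntries, scanS]
  | succ n ihn =>
    intro j mc mi hj hn
    have hjlt : j < ci := by omega
    rw [take_drop_cons arr ci j hjlt h1, take_drop_cons count_arr ci j hjlt h2]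
    rw [show mkEntries (arr.getD j 0 :: (arr.take ci).drop (j+1))
          (count_arr.getD j 0 :: (count_arr.take ci).drop (j+1)) j
        = (arr.getD j 0, j, count_arr.getD j 0)
            :: mkEntries ((arr.take ci).drop (j+1)) ((count_arr.take ci).drop (j+1)) (j+1) from rfl]
    rw [scanS]
    rw [argmaxLoop, dif_pos hjlt]
    simp only []
    split_ifs with hcond
    · exact ihn (j+1) (count_arr.getD j 0) j (by omega) (by omega)
    · exact ihn (j+1) mc mi (by omega) (by omega)

-- the loop invariant: both main loops agree given the bucket representation
lemma set_append_repl (R : List Int) (k m : Nat) (x : Int) (hR : R.length = k) :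
    (R ++ List.replicate (m + 1) 0).set k x = (R ++ [x]) ++ List.replicate m 0 := by
  rw [List.set_append_right _ _ (by omega)]
  simp [hR, List.replicate_succ]

lemma loop_eq (arr : List Int) : ∀ (m k : Nat) (R C : List Int)
    (buckets : List (List (Int × Nat))),
    arr.length - k = m → k ≤ arr.length → R.length = k → C.length = k →
    (∀ c ∈ C, 1 ≤ c ∧ c ≤ (buckets.length : Int)) →
    buckets = bucketsOf (mkEntries (arr.take k) C 0) buckets.length →
    mrLoop arr k (R ++ List.replicate (arr.length - k) 0)
        (C ++ List.replicate (arr.length - k) 0)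
      = altLoop (arr.drop k) k R.reverse C.reverse buckets := by
  intro m
  induction m with
  | zero =>
    intro k R C buckets hm hk hR hC hc hbk
    have hkn : k = arr.length := by omega
    rw [mrLoop, dif_neg (by omega)]
    rw [List.drop_of_length_le (by omega)]
    rw [altLoop]
    simp [hkn]
  | succ m ihm =>
    intro k R C buckets hm hk hR hC hc hbk
    have hkn : k < arr.length := by omega
    have hrepl : arr.length - k = (arr.length - (k + 1)) + 1 := by omega
    rw [hrepl]
    have hCA : (C ++ List.replicate ((arr.length - (k + 1)) + 1) 0).take k = C :=
      List.take_left' hC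
    -- A's inner loop at step k, as a scan over the entries of the prefix
    have hargm : argmax_count arr k (C ++ List.replicate ((arr.length - (k + 1)) + 1) 0)
        = (scanS (mkEntries (arr.take k) C 0) (arr.getD k 0) (0, k)).2 := by
      rw [argmax_count,
        argmaxLoop_eq_scan _ _ _ _ _ _ _ (by omega) (by omega) (by simp; omega)]
      rw [hCA]
      simp
    have hb : ∀ e ∈ mkEntries (arr.take k) C 0,
        1 ≤ e.2.2 ∧ e.2.2 ≤ ((buckets.length : Nat) : Int) :=
      fun e he => hc _ (mkEntries_count_mem _ _ _ _ he)
    obtain ⟨hnone, hsome⟩ :=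
      scan_eq_search buckets.length (mkEntries (arr.take k) C 0) (arr.getD k 0) k hb
    have hdrop : arr.drop k = arr.getD k 0 :: arr.drop (k + 1) := by
      rw [List.drop_eq_getElem_cons hkn]
      congr 1
      exact (List.getD_eq_getElem arr 0 hkn).symm
    have htake : arr.take (k + 1) = arr.take k ++ [arr.getD k 0] := by
      have hg : arr.getD k 0 = arr[k] := List.getD_eq_getElem arr 0 hkn
      rw [List.take_add_one, List.getElem?_eq_getElem hkn, hg]
      rfl
    rw [hdrop]
    rw [mrLoop, dif_pos hkn]
    rw [altLoop]
    cases hfp : findPred buckets.reverse (arr.getD k 0) with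
    | none =>
      simp only []
      have hind : argmax_count arr k (C ++ List.replicate ((arr.length - (k + 1)) + 1) 0) = k := by
        rw [hargm]
        exact hnone (by rw [← hbk]; exact hfp)
      have hgetk : (C ++ List.replicate ((arr.length - (k + 1)) + 1) 0).getD k 0 = 0 := by
        rw [List.getD_eq_getElem _ _ (by simp; omega)]
        rw [List.getElem_append_right (by omega)]
        simp
      rw [hind, hgetk]
      rw [set_append_repl R k _ _ hR, set_append_repl C k _ _ hC]
      have hbk' : addEntry buckets 1 (arr.getD k 0, k)
          = bucketsOf (mkEntries (arr.take (k + 1)) (C ++ [(0 : Int) + 1]) 0)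
              (max buckets.length 1) := by
        rw [hbk]
        rw [addEntry_eq _ _ _ _ _ (by omega) (by omega) (fun e he => (hb e he).2)]
        rw [htake, mkEntries_append _ _ _ _ _ (by simp [hC]; omega)]
        rw [length_bucketsOf]
        have hlt : (List.take k arr).length = k := by simp; omega
        rw [hlt]
        norm_num
      have := ihm (k + 1) (R ++ [((k : Nat) : Int)]) (C ++ [(0 : Int) + 1])
          (addEntry buckets 1 (arr.getD k 0, k))
          (by omega) (by omega) (by simp [hR]) (by simp [hC])
          (by
            intro c hcm
            rw [hbk']
            rw [length_bucketsOf]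
            rcases List.mem_append.mp hcm with h | h
            · have := hc c h
              constructor
              · exact this.1
              · have : c ≤ (buckets.length : Int) := this.2
                have hle : (buckets.length : Int) ≤ ((max buckets.length 1 : Nat) : Int) := by
                  push_cast; omega
                omega
            · simp at h
              subst h
              constructor
              · omega
              · have : (1 : Int) ≤ ((max buckets.length 1 : Nat) : Int) := by push_cast; omega
                omega)
          (by rw [hbk']; rw [length_bucketsOf])
      simpa [List.reverse_append] using this
    | some jc =>
      obtain ⟨j, c⟩ := jc
      simp only []
      obtain ⟨hscan, w, hmem⟩ := hsome j c (by rw [← hbk]; exact hfp)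
      obtain ⟨-, hjlt, hgetj⟩ := mkEntries_mem _ _ _ _ _ _ hmem
      rw [hC] at hjlt
      simp only [Nat.sub_zero] at hjlt hgetj
      have hcM : c ≤ buckets.length := by
        have := findPred_le _ _ _ _ hfp
        simpa using this
      have hind : argmax_count arr k (C ++ List.replicate ((arr.length - (k + 1)) + 1) 0) = j := by
        rw [hargm]; exact hscan
      have hgetjj : (C ++ List.replicate ((arr.length - (k + 1)) + 1) 0).getD j 0 = (c : Int) := by
        rw [List.getD_append _ _ _ _ (by omega)]
        exact hgetj
      rw [hind, hgetjj]
      rw [set_append_repl R k _ _ hR, set_append_repl C k _ _ hC]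
      have hbk' : addEntry buckets (c + 1) (arr.getD k 0, k)
          = bucketsOf (mkEntries (arr.take (k + 1)) (C ++ [(c : Int) + 1]) 0)
              (max buckets.length (c + 1)) := by
        rw [hbk]
        rw [addEntry_eq _ _ _ _ _ (by omega) (by omega) (fun e he => (hb e he).2)]
        rw [htake, mkEntries_append _ _ _ _ _ (by simp [hC]; omega)]
        rw [length_bucketsOf]
        have hcast : (((c + 1 : Nat)) : Int) = (c : Int) + 1 := by push_cast; ring
        rw [hcast]
        have hlt : (List.take k arr).length = k := by simp; omega
        rw [hlt]
        norm_num
      have := ihm (k + 1) (R ++ [((j : Nat) : Int)]) (C ++ [(c : Int) + 1])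
          (addEntry buckets (c + 1) (arr.getD k 0, k))
          (by omega) (by omega) (by simp [hR]) (by simp [hC])
          (by
            intro x hxm
            rw [hbk']
            rw [length_bucketsOf]
            rcases List.mem_append.mp hxm with h | h
            · have hx := hc x h
              have hle : (buckets.length : Int) ≤ ((max buckets.length (c + 1) : Nat) : Int) := by
                push_cast; omega
              exact ⟨hx.1, by have := hx.2; omega⟩
            · simp at h
              subst h
              have hle : ((c : Int) + 1) ≤ ((max buckets.length (c + 1) : Nat) : Int) := by
                push_cast; omega
              exact ⟨by omega, hle⟩)
          (by rw [hbk']; rw [length_bucketsOf])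
      simpa [List.reverse_append, Nat.cast_add, Nat.cast_one] using this

-- ===== VERDICT (by name: the statement is the Claim_ definition above) =====
theorem make_routes_spec : Claim_equal_make_routes := by
  intro arr _
  unfold Spec_make_routes make_routes make_routes_alt
  have h := loop_eq arr arr.length 0 [] [] [] (by omega) (by omega) rfl rfl (by simp)
    (by simp [bucketsOf, mkEntries])
  simpa [mkEntries] using h
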